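-- pv_equiv track=rewrite | github.com/khyojun/coding--test | programmers-30.py | solution
-- ===== SOURCE A (Python) =====
-- def bina(n,cnt): # 비밀지도
--     bina=[]
--     while(cnt):
--         if n==0:
--             bina.append(0)
--             cnt-=1
--             continue
--         bina.append(n%2)
--         n=n//2
--         cnt-=1
--     bina.reverse()
--     return bina
--
-- def solution(n, arr1, arr2):
--     answer = []
--
--     for i in range(n):
--         str_map=[]
--         a=[]
--         b=[]
--         a=bina(arr1[i],n)
--         b=bina(arr2[i],n)
--         for j in range(n):
--             if a[j] or b[j]:
--                 str_map.append('#')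
--             else:
--                 str_map.append(' ')
--
--         ans_str=''.join(str_map)
--         answer.append(ans_str)
--
--
--
--
--
--     return answer
-- ===== SOURCE B (Python) =====
-- def solution(n, arr1, arr2):
--     if n <= 0:
--         return []
--     tr = str.maketrans('10', '# ')
--     mask = (1 << n) - 1
--     return [format((x | y) & mask, 'b').zfill(n).translate(tr)
--             for x, y in zip(arr1[:n], arr2[:n])]
-- ===== Notes on version B (the rewrite author's own statement) =====
-- stated objective: idiomatic
-- what changed: A builds a full base-2 digit list per array entry with a hand-rolled while-loop helper and then merges two digit lists with a second per-bit index loop; B does one integer OR masked to n bits per row, converts that single number to a binary string with format(v,'b'), left-pads with zfill and translates '1'/'0' to '#'/' ' with str.translate, so the per-bit digit loops disappear.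
import Mathlib
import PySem

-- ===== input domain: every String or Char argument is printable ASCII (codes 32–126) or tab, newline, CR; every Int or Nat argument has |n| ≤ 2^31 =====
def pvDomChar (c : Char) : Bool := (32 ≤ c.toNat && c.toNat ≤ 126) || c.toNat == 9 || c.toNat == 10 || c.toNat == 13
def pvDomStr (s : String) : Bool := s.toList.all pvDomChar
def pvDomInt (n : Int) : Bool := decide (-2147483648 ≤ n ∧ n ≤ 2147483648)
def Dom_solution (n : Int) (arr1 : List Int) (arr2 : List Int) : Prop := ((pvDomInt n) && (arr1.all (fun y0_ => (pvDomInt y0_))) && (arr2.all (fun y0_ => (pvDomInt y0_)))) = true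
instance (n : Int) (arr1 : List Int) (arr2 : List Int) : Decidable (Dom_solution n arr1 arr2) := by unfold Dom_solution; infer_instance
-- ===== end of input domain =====

-- B replaces A's per-row digit-list helper and per-bit OR loop by a single integer OR masked to
-- n bits, one number-to-binary-string conversion, left-padding and a character translation
-- (objective: idiomatic).

-- ===== PORT A =====
-- Python's 'while(cnt)' loop of bina, unrolled on the (nonnegative) counter; exact for cnt ≥ 0
-- (solution only calls bina with cnt = n and n ≥ 1, since the call sits inside 'for i in range(n)').
def binaAux (x : Int) : Nat → List Int
  | 0 => []
  | c + 1 =>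
    if x = 0 then 0 :: binaAux x c
    else PySem.Int.mod x 2 :: binaAux (PySem.Int.floordiv x 2) c

def bina (x : Int) (cnt : Int) : List Int := (binaAux x cnt.toNat).reverse

def solution (n : Int) (arr1 : List Int) (arr2 : List Int) : List String :=
  (PySem.List.pyRange 0 n 1).foldl (fun answer i =>
    let a := bina (PySem.List.pyGetD arr1 i 0) n
    let b := bina (PySem.List.pyGetD arr2 i 0) n
    let strMap := (PySem.List.pyRange 0 n 1).foldl (fun sm j =>
      if PySem.List.pyGetD a j 0 ≠ 0 ∨ PySem.List.pyGetD b j 0 ≠ 0 then sm ++ ['#'] else sm ++ [' ']) []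
    answer ++ [String.mk strMap]) []

-- ===== PORT B =====
-- Hand port of format(v, 'b') for v ≥ 0 (exact there: MSB-first binary digits, "0" for 0).
-- (the recursion 'digits of v//2, then digit v%2' runs on a structural fuel ≥ v so the
-- kernel can evaluate it; pvBin gives the fuel)
def pvBinAux : Nat → Nat → List Char
  | 0, _ => []
  | _ + 1, 0 => []
  | fuel + 1, v + 1 => pvBinAux fuel ((v + 1) / 2) ++ [if (v + 1) % 2 = 1 then '1' else '0']

def pvBin (v : Nat) : List Char := if v = 0 then ['0'] else pvBinAux v v

-- str.translate(str.maketrans('10', '# ')) on one character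
def pvTr (c : Char) : Char := if c = '1' then '#' else if c = '0' then ' ' else c

def solution_alt (n : Int) (arr1 : List Int) (arr2 : List Int) : List String :=
  if n ≤ 0 then []
  else
    let mask : Int := ((1 : Int) <<< n.toNat) - 1
    (List.zip (PySem.List.slice arr1 none (some n)) (PySem.List.slice arr2 none (some n))).map
      (fun p => String.mk ((PySem.Chars.zfill
        (pvBin (PySem.Int.band (PySem.Int.bor p.1 p.2) mask).toNat) n).map pvTr))

-- ===== PRECONDITION & SPEC =====
-- Pre_ excludes exactly the inputs where A raises IndexError: arr1[i] / arr2[i] with i up to n-1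
-- requires both lists to have at least n elements.
def Pre_solution (n : Int) (arr1 : List Int) (arr2 : List Int) : Prop :=
  n ≤ (arr1.length : Int) ∧ n ≤ (arr2.length : Int)
instance (n : Int) (arr1 : List Int) (arr2 : List Int) : Decidable (Pre_solution n arr1 arr2) := by unfold Pre_solution; infer_instance

def pvWitness_solution : Int × List Int × List Int := (2, [9, 20], [30, 1])

def Spec_solution (n : Int) (arr1 : List Int) (arr2 : List Int) (out : List String) : Prop := out = solution_alt n arr1 arr2
instance (n : Int) (arr1 : List Int) (arr2 : List Int) (out : List String) : Decidable (Spec_solution n arr1 arr2 out) := by unfold Spec_solution; infer_instance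

-- ===== CLAIM (what is proved, stated in full; the proofs are below) =====
def Claim_equal_solution : Prop := ∀ (n : Int) (arr1 : List Int) (arr2 : List Int), Dom_solution n arr1 arr2 → Pre_solution n arr1 arr2 → Spec_solution n arr1 arr2 (solution n arr1 arr2)

-- ===== LEMMAS AND PROOFS =====

-- Python's bit j of an arbitrary int, in two's-complement reading
def pvIbit (x : Int) (j : Nat) : Bool :=
  match x with
  | .ofNat m => m.testBit j
  | .negSucc m => !(m.testBit j)

-- Python's x >> 1 is x // 2.
theorem shiftRight_one_floordiv (x : Int) : Int.shiftRight x 1 = PySem.Int.floordiv x 2 := by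
  cases x with
  | ofNat m =>
    show (Int.ofNat (m >>> 1)) = _
    rw [Nat.shiftRight_eq_div_pow]
    simp [Int.ofNat_eq_natCast, pow_one]
  | negSucc m =>
    show (Int.negSucc (m >>> 1)) = _
    rw [PySem.Int.floordiv_eq_ediv_of_pos (by norm_num), Nat.shiftRight_eq_div_pow]
    simp [Int.negSucc_eq]
    omega

theorem binaAux_succ (x : Int) (c : Nat) :
    binaAux x (c + 1) = PySem.Int.mod x 2 :: binaAux (PySem.Int.floordiv x 2) c := by
  by_cases h : x = 0
  · subst h; simp [binaAux]
  · simp [binaAux, h]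

theorem binaAux_eq (c : Nat) (x : Int) :
    binaAux x c = (List.range c).map (fun j => PySem.Int.band (Int.shiftRight x j) 1) := by
  induction c generalizing x with
  | zero => simp [binaAux]
  | succ c ih =>
    rw [binaAux_succ, ih, List.range_succ_eq_map]
    simp only [List.map_cons, List.map_map]
    congr 1
    · rw [← PySem.Int.band_one]
      congr 1
      cases x <;> rfl
    · apply List.map_congr_left
      intro j _
      simp only [Function.comp_apply]
      rw [← shiftRight_one_floordiv]
      show _ = PySem.Int.band (x >>> (j + 1)) 1
      rw [Nat.add_comm j 1, Int.shiftRight_add]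
      rfl

-- the k-th entry of a digit list produced by bina
theorem bina_getD (x n : Int) (k : Nat) (hk : k < n.toNat) :
    (bina x n).getD k 0 = PySem.Int.band (Int.shiftRight x (n.toNat - 1 - k)) 1 := by
  have hb : bina x n =
      ((List.range n.toNat).map (fun j => PySem.Int.band (Int.shiftRight x j) 1)).reverse := by
    rw [bina, binaAux_eq]
  rw [hb]
  rw [List.getD_eq_getElem _ _ (by simp; omega)]
  rw [List.getElem_reverse]
  simp only [List.getElem_map, List.getElem_range, List.length_map, List.length_range]

-- A's per-bit test is the two's-complement bit
theorem band_shift_ne_zero (x : Int) (j : Nat) :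
    (PySem.Int.band (Int.shiftRight x j) 1 ≠ 0) ↔ pvIbit x j = true := by
  rw [PySem.Int.band_one]
  cases x with
  | ofNat m =>
    show (PySem.Int.mod (Int.ofNat (m >>> j)) 2 ≠ 0) ↔ _
    rw [show PySem.Int.mod (Int.ofNat (m >>> j)) 2 = (Int.ofNat (m >>> j)) % 2 by
      show Int.fmod _ 2 = _ % 2; rw [Int.fmod_eq_emod]; simp]
    rw [show pvIbit (Int.ofNat m) j = decide ((m >>> j) % 2 = 1) from by
          show m.testBit j = _
          rw [Nat.shiftRight_eq_div_pow]; exact Nat.testBit_eq_decide_div_mod_eq,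
        Int.ofNat_eq_natCast]
    generalize m >>> j = q
    rcases Nat.mod_two_eq_zero_or_one q with h2 | h2 <;> simp [h2] <;> omega
  | negSucc m =>
    show (PySem.Int.mod (Int.negSucc (m >>> j)) 2 ≠ 0) ↔ _
    rw [show PySem.Int.mod (Int.negSucc (m >>> j)) 2 = (Int.negSucc (m >>> j)) % 2 by
      show Int.fmod _ 2 = _ % 2; rw [Int.fmod_eq_emod]; simp]
    rw [show pvIbit (Int.negSucc m) j = !decide ((m >>> j) % 2 = 1) from by
          show (!(m.testBit j)) = _
          rw [Nat.shiftRight_eq_div_pow]; rw [show m.testBit j = decide (m / 2 ^ j % 2 = 1) from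
            Nat.testBit_eq_decide_div_mod_eq],
        Int.negSucc_eq]
    rw [show ((m >>> j : Nat) : Int) + 1 = ((m >>> j : Nat) : Int) + 1 from rfl]
    generalize m >>> j = q
    rcases Nat.mod_two_eq_zero_or_one q with h2 | h2 <;> simp [h2] <;> omega

-- bit-subtraction is ldiff (used to read PySem's band/bor on mixed signs)
theorem sub_and_eq_ldiff (m : Nat) : ∀ k, m - (m &&& k) = Nat.ldiff m k := by
  induction m using Nat.binaryRec with
  | zero => intro k; simp [Nat.ldiff]
  | bit a m ih =>
    intro k
    induction k using Nat.binaryRec with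
    | zero =>
      have h0 : Nat.bit a m &&& 0 = 0 := by simp
      have h1 : Nat.ldiff (Nat.bit a m) 0 = Nat.bit a m := by
        apply Nat.eq_of_testBit_eq; intro i; simp [Nat.testBit_ldiff]
      omega
    | bit b k _ =>
      rw [Nat.land_bit, Nat.ldiff_bit, Nat.bit_val, Nat.bit_val, Nat.bit_val]
      have hle : m &&& k ≤ m := Nat.and_le_left
      have hih := ih k
      cases a <;> cases b <;> simp [Bool.toNat] <;> omega

-- PySem.Int.bor by constructor cases
theorem bor_cases :
    (∀ a b : Nat, PySem.Int.bor (Int.ofNat a) (Int.ofNat b) = Int.ofNat (a ||| b)) ∧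
    (∀ a b : Nat, PySem.Int.bor (Int.ofNat a) (Int.negSucc b) = Int.negSucc (Nat.ldiff b a)) ∧
    (∀ a b : Nat, PySem.Int.bor (Int.negSucc a) (Int.ofNat b) = Int.negSucc (Nat.ldiff a b)) ∧
    (∀ a b : Nat, PySem.Int.bor (Int.negSucc a) (Int.negSucc b) = Int.negSucc (a &&& b)) := by
  have hno : ∀ b : Nat, ¬ ((0:Int) ≤ Int.negSucc b) := fun b => by
    simp [Int.negSucc_eq]; omega
  have hyes : ∀ a : Nat, (0:Int) ≤ Int.ofNat a := fun a => Int.ofNat_nonneg a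
  have hns : ∀ b : Nat, -Int.negSucc b - 1 = (b : Int) := fun b => by
    simp [Int.negSucc_eq]
  refine ⟨fun a b => ?_, fun a b => ?_, fun a b => ?_, fun a b => ?_⟩
  · simpa using PySem.Int.bor_natCast a b
  · simp only [PySem.Int.bor, if_pos (hyes a), if_neg (hno b), hns]
    rw [show ((b:Int).toNat) = b from Int.toNat_natCast b,
        show ((Int.ofNat a).toNat) = a from rfl, sub_and_eq_ldiff]
    simp [Int.negSucc_eq]; ring
  · simp only [PySem.Int.bor, if_neg (hno a), if_pos (hyes b), hns]
    rw [show ((a:Int).toNat) = a from Int.toNat_natCast a,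
        show ((Int.ofNat b).toNat) = b from rfl, sub_and_eq_ldiff]
    simp [Int.negSucc_eq]; ring
  · simp only [PySem.Int.bor, if_neg (hno a), if_neg (hno b), hns]
    simp [Int.negSucc_eq]; ring

-- PySem.Int.band with a nonnegative mask, by cases on the left argument
theorem band_natCast_right (c m : Nat) :
    PySem.Int.band (Int.ofNat c) (Int.ofNat m) = Int.ofNat (c &&& m) := by
  simpa using PySem.Int.band_natCast c m

theorem band_negSucc_left (c m : Nat) :
    PySem.Int.band (Int.negSucc c) (Int.ofNat m) = Int.ofNat (Nat.ldiff m c) := by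
  have hno : ¬ ((0:Int) ≤ Int.negSucc c) := by simp [Int.negSucc_eq]; omega
  have hyes : (0:Int) ≤ Int.ofNat m := Int.ofNat_nonneg m
  simp only [PySem.Int.band, if_neg hno, if_pos hyes]
  rw [show (-Int.negSucc c - 1) = (c : Int) from by simp [Int.negSucc_eq],
      show ((c:Int).toNat) = c from Int.toNat_natCast c,
      show ((Int.ofNat m).toNat) = m from rfl, sub_and_eq_ldiff]
  rfl

-- the masked OR: nonnegative, below 2^k, with the expected bits
theorem masked_or (x y : Int) (k : Nat) :
    ∃ w : Nat, PySem.Int.band (PySem.Int.bor x y) ((1 : Int) <<< k - 1) = Int.ofNat w ∧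
      w < 2 ^ k ∧ ∀ j, j < k → w.testBit j = (pvIbit x j || pvIbit y j) := by
  obtain ⟨h00, h01, h10, h11⟩ := bor_cases
  have h1le : 1 ≤ 2 ^ k := Nat.one_le_two_pow
  have hmask : ((1 : Int) <<< k - 1) = Int.ofNat (2 ^ k - 1) := by
    rw [show ((1:Int) <<< k) = Int.ofNat (1 <<< k) from rfl, Nat.one_shiftLeft]
    simp only [Int.ofNat_eq_natCast]
    omega
  rw [hmask]
  have hltldiff : ∀ c : Nat, Nat.ldiff (2 ^ k - 1) c < 2 ^ k := by
    intro c
    apply Nat.lt_pow_two_of_testBit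
    intro i hi
    rw [Nat.testBit_ldiff, Nat.testBit_two_pow_sub_one]
    simp [Nat.not_lt.mpr hi]
  cases x with
  | ofNat a =>
    cases y with
    | ofNat b =>
      refine ⟨(a ||| b) &&& (2 ^ k - 1), by rw [h00, band_natCast_right], ?_, ?_⟩
      · have := Nat.and_le_right (n := a ||| b) (m := 2 ^ k - 1); omega
      · intro j hj
        rw [Nat.testBit_land, Nat.testBit_lor, Nat.testBit_two_pow_sub_one]
        show _ = (a.testBit j || b.testBit j)
        simp [hj]
    | negSucc b =>
      refine ⟨Nat.ldiff (2 ^ k - 1) (Nat.ldiff b a), by rw [h01, band_negSucc_left],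
        hltldiff _, ?_⟩
      intro j hj
      rw [Nat.testBit_ldiff, Nat.testBit_ldiff, Nat.testBit_two_pow_sub_one]
      show _ = (a.testBit j || !b.testBit j)
      cases a.testBit j <;> cases b.testBit j <;> simp [hj]
  | negSucc a =>
    cases y with
    | ofNat b =>
      refine ⟨Nat.ldiff (2 ^ k - 1) (Nat.ldiff a b), by rw [h10, band_negSucc_left],
        hltldiff _, ?_⟩
      intro j hj
      rw [Nat.testBit_ldiff, Nat.testBit_ldiff, Nat.testBit_two_pow_sub_one]
      show _ = (!a.testBit j || b.testBit j)
      cases a.testBit j <;> cases b.testBit j <;> simp [hj]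
    | negSucc b =>
      refine ⟨Nat.ldiff (2 ^ k - 1) (a &&& b), by rw [h11, band_negSucc_left],
        hltldiff _, ?_⟩
      intro j hj
      rw [Nat.testBit_ldiff, Nat.testBit_land, Nat.testBit_two_pow_sub_one]
      show _ = (!a.testBit j || !b.testBit j)
      cases a.testBit j <;> cases b.testBit j <;> simp [hj]

-- pvBinAux of a positive v lists v's bits, MSB first
def pvBlen : Nat → Nat
  | 0 => 0
  | v + 1 => pvBlen ((v + 1) / 2) + 1
decreasing_by exact Nat.div_lt_self (Nat.succ_pos v) (by omega)

theorem lt_two_pow_pvBlen (v : Nat) : v < 2 ^ pvBlen v := by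
  induction v using Nat.strong_induction_on with
  | _ v ih =>
    match v with
    | 0 => simp [pvBlen]
    | v + 1 =>
      have h2 : (v + 1) / 2 < v + 1 := Nat.div_lt_self (Nat.succ_pos v) (by omega)
      have := ih ((v + 1) / 2) h2
      rw [pvBlen, pow_succ]
      omega

theorem pvBlen_le (v : Nat) : ∀ n, v < 2 ^ n → pvBlen v ≤ n := by
  induction v using Nat.strong_induction_on with
  | _ v ih =>
    match v with
    | 0 => intro n _; simp [pvBlen]
    | v + 1 =>
      intro n h
      have hn : n ≠ 0 := by rintro rfl; simp at h
      obtain ⟨n', rfl⟩ := Nat.exists_eq_succ_of_ne_zero hn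
      have h2 : (v + 1) / 2 < v + 1 := Nat.div_lt_self (Nat.succ_pos v) (by omega)
      have hv2 : (v + 1) / 2 < 2 ^ n' := by
        rw [pow_succ] at h; omega
      have := ih ((v + 1) / 2) h2 n' hv2
      rw [pvBlen]
      omega

theorem pvBinAux_eq (v : Nat) : ∀ fuel, v ≤ fuel →
    pvBinAux fuel v = ((List.range (pvBlen v)).map (fun j => if v.testBit j then '1' else '0')).reverse := by
  induction v using Nat.strong_induction_on with
  | _ v ih =>
    match v with
    | 0 => intro fuel _; cases fuel <;> simp [pvBinAux, pvBlen]
    | v + 1 =>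
      intro fuel hf
      obtain ⟨f', rfl⟩ := Nat.exists_eq_succ_of_ne_zero (show fuel ≠ 0 by omega)
      have h2 : (v + 1) / 2 < v + 1 := Nat.div_lt_self (Nat.succ_pos v) (by omega)
      rw [show pvBinAux (f' + 1) (v + 1)
            = pvBinAux f' ((v + 1) / 2) ++ [if (v + 1) % 2 = 1 then '1' else '0'] from rfl,
          ih ((v + 1) / 2) h2 f' (by omega), pvBlen, List.range_succ_eq_map]
      simp only [List.map_cons, List.map_map, List.reverse_cons]
      congr 1
      · apply congrArg
        apply List.map_congr_left
        intro j _
        simp only [Function.comp_apply, Nat.testBit_add_one]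
      · simp only [Nat.testBit_zero]
        rcases Nat.mod_two_eq_zero_or_one (v + 1) with h | h <;> simp [h]

-- zfill on an unsigned nonempty string is plain left padding
theorem zfill_nosign (cs : List Char) (w : Int) (hne : cs ≠ [])
    (hh : ∀ c ∈ cs.head? , c ≠ '+' ∧ c ≠ '-') :
    PySem.Chars.zfill cs w = List.replicate (w.toNat - cs.length) '0' ++ cs := by
  match cs with
  | [] => exact absurd rfl hne
  | c :: rest =>
    have hc := hh c rfl
    simp only [PySem.Chars.zfill]
    split
    · rename_i hw
      have : w.toNat - (c :: rest).length = 0 := by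
        simp only [List.length_cons] at hw ⊢; omega
      rw [this]; rfl
    · rw [if_neg (by tauto)]

-- the padded binary string of w < 2^k, read MSB first
theorem zfill_pvBin (w : Nat) (n : Int) (hn : 0 < n) (hw : w < 2 ^ n.toNat) :
    PySem.Chars.zfill (pvBin w) n =
      ((List.range n.toNat).map (fun j => if w.testBit j then '1' else '0')).reverse := by
  have hk1 : 1 ≤ n.toNat := by omega
  by_cases h0 : w = 0
  · subst h0
    have hall : (List.range n.toNat).map (fun j => if Nat.testBit 0 j then '1' else '0')
        = List.replicate n.toNat '0' := by
      rw [List.eq_replicate_iff]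
      constructor
      · simp
      · intro c hc
        obtain ⟨j, _, rfl⟩ := List.mem_map.mp hc
        simp
    rw [hall, List.reverse_replicate]
    rw [show pvBin 0 = ['0'] from rfl]
    rw [zfill_nosign ['0'] n (by simp) (by intro c hc; simp at hc; subst hc; decide)]
    rw [show (['0'] : List Char) = List.replicate 1 '0' from rfl, ← List.replicate_add]
    congr 1
    simp
    omega
  · set L := pvBlen w with hL
    have hLle : L ≤ n.toNat := pvBlen_le w n.toNat hw
    have hwL : w < 2 ^ L := lt_two_pow_pvBlen w
    have hL1 : 1 ≤ L := by
      by_contra h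
      have : L = 0 := by omega
      rw [this] at hwL; simp at hwL; exact h0 hwL
    have hbin : pvBin w
        = ((List.range L).map (fun j => if w.testBit j then '1' else '0')).reverse := by
      rw [pvBin, if_neg h0]; exact pvBinAux_eq w w le_rfl
    have hmem01 : ∀ c ∈ pvBin w, c = '1' ∨ c = '0' := by
      intro c hc
      rw [hbin, List.mem_reverse] at hc
      obtain ⟨j, _, rfl⟩ := List.mem_map.mp hc
      split <;> simp
    have hlen : (pvBin w).length = L := by rw [hbin]; simp
    rw [zfill_nosign (pvBin w) n (by rw [← List.length_pos_iff, hlen]; omega)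
        (by intro c hc
            have := hmem01 c (List.mem_of_mem_head? hc)
            rcases this with h | h <;> subst h <;> exact ⟨by decide, by decide⟩)]
    rw [hlen, hbin]
    rw [show n.toNat = L + (n.toNat - L) from by omega, List.range_add, List.map_append,
        List.reverse_append]
    congr 1
    have : (List.range (n.toNat - L)).map
          ((fun j => if w.testBit j then '1' else '0') ∘ (fun x => L + x))
        = List.replicate (n.toNat - L) '0' := by
      rw [List.eq_replicate_iff]
      refine ⟨by simp, ?_⟩
      intro c hc
      obtain ⟨j, _, rfl⟩ := List.mem_map.mp hc
      have hbit : w.testBit (L + j) = false :=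
        Nat.testBit_lt_two_pow (by
          calc w < 2 ^ L := hwL
          _ ≤ 2 ^ (L + j) := Nat.pow_le_pow_right (by omega) (by omega))
      simp [Function.comp, hbit]
    rw [List.map_map, this, List.reverse_replicate]
    congr 1
    omega

-- one output row: A's digit-list merge equals B's translated padded binary of the masked OR
theorem row_eq (n : Int) (hn : 0 < n) (x y : Int) :
    (PySem.List.pyRange 0 n 1).foldl (fun sm j =>
      if PySem.List.pyGetD (bina x n) j 0 ≠ 0 ∨ PySem.List.pyGetD (bina y n) j 0 ≠ 0
      then sm ++ ['#'] else sm ++ [' ']) []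
    = (PySem.Chars.zfill
        (pvBin (PySem.Int.band (PySem.Int.bor x y) ((1 : Int) <<< n.toNat - 1)).toNat) n).map
        pvTr := by
  obtain ⟨w, hw_eq, hw_lt, hw_bit⟩ := masked_or x y n.toNat
  rw [hw_eq, show (Int.ofNat w).toNat = w from rfl, zfill_pvBin w n hn hw_lt]
  have hbody : (fun (sm : List Char) (j : Int) =>
      if PySem.List.pyGetD (bina x n) j 0 ≠ 0 ∨ PySem.List.pyGetD (bina y n) j 0 ≠ 0
      then sm ++ ['#'] else sm ++ [' ']) = (fun sm j => sm ++
        [if PySem.List.pyGetD (bina x n) j 0 ≠ 0 ∨ PySem.List.pyGetD (bina y n) j 0 ≠ 0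
         then '#' else ' ']) := by
    funext sm j; split <;> simp
  rw [hbody, PySem.List.foldl_append_singleton_eq_map]
  simp only [List.nil_append]
  apply List.ext_getElem
  · simp [PySem.List.length_pyRange_one]
  · intro p hA hB
    simp only [List.length_map, PySem.List.length_pyRange_one] at hA
    have hp : p < n.toNat := by omega
    have hj : n.toNat - 1 - p < n.toNat := by omega
    simp only [List.getElem_map, PySem.List.getElem_pyRange_one, zero_add,
      List.getElem_reverse, List.length_map, List.length_range, List.getElem_range]
    have g1 : PySem.List.pyGetD (bina x n) ((p : Int)) 0 = (bina x n).getD p 0 :=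
      PySem.List.pyGetD_natCast _ _ _
    have g2 : PySem.List.pyGetD (bina y n) ((p : Int)) 0 = (bina y n).getD p 0 :=
      PySem.List.pyGetD_natCast _ _ _
    rw [g1, g2, bina_getD x n p hp, bina_getD y n p hp]
    rw [hw_bit (n.toNat - 1 - p) hj]
    have e1 := band_shift_ne_zero x (n.toNat - 1 - p)
    have e2 := band_shift_ne_zero y (n.toNat - 1 - p)
    cases hx : pvIbit x (n.toNat - 1 - p) <;> cases hy : pvIbit y (n.toNat - 1 - p) <;>
      rw [hx] at e1 <;> rw [hy] at e2 <;> simp [e1, e2, pvTr]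

theorem solution_spec : Claim_equal_solution := by
  intro n arr1 arr2 _ hPre
  unfold Spec_solution solution solution_alt
  obtain ⟨h1, h2⟩ := hPre
  by_cases hn : n ≤ 0
  · rw [PySem.List.pyRange_one_eq_nil hn, if_pos hn]
    simp
  · rw [if_neg hn]
    have hn0 : 0 < n := by omega
    have hm1 : n.toNat ≤ arr1.length := by omega
    have hm2 : n.toNat ≤ arr2.length := by omega
    rw [PySem.List.foldl_append_singleton_eq_map]
    simp only [List.nil_append]
    rw [PySem.List.slice_to arr1 (le_of_lt hn0), PySem.List.slice_to arr2 (le_of_lt hn0)]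
    apply List.ext_getElem
    · simp [PySem.List.length_pyRange_one]
      omega
    · intro k hA hB
      simp only [List.length_map, PySem.List.length_pyRange_one] at hA
      have hk : k < n.toNat := by omega
      simp only [List.getElem_map, List.getElem_zip, PySem.List.getElem_pyRange_one, zero_add,
        List.getElem_take]
      congr 1
      have g1 : PySem.List.pyGetD arr1 ((k : Int)) 0 = arr1[k] := by
        rw [PySem.List.pyGetD_natCast]
        exact List.getD_eq_getElem _ _ (by omega)
      have g2 : PySem.List.pyGetD arr2 ((k : Int)) 0 = arr2[k] := by
        rw [PySem.List.pyGetD_natCast]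
        exact List.getD_eq_getElem _ _ (by omega)
      rw [g1, g2]
      exact row_eq n hn0 arr1[k] arr2[k]
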